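-- pv_equiv track=rewrite | github.com/coasterkolja/coding_sloth | where_is_waldo/main.py | whereIsWaldo
-- ===== SOURCE A (Python) =====
-- def whereIsWaldo(arr):
--     elements = []
--     for i in range(len(arr)):
--         for j in range(len(arr[i])):
--             elements.append((arr[i][j], i + 1, j + 1))
--
--     counts = {}
--     for element in elements:
--         value = element[0]
--         if value in counts:
--             counts[value].append(element[1:])
--         else:
--             counts[value] = [element[1:]]
--
--     for key, value in counts.items():
--         if len(value) == 1:
--             return value[0]
-- ===== SOURCE B (Python) =====
-- def whereIsWaldo(arr):
--     counts = {}
--     for row in arr: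
--         for v in row:
--             counts[v] = counts.get(v, 0) + 1
--     for i, row in enumerate(arr, 1):
--         for j, v in enumerate(row, 1):
--             if counts.get(v, 0) == 1:
--                 return (i, j)
-- ===== Notes on version B (the rewrite author's own statement) =====
-- stated objective: simpler
-- what changed: B keeps only a value->frequency counter built in one pass and re-scans the grid row-major for the first cell whose value has count 1, instead of materialising a triple list and a dict of position lists and iterating its items.
-- outside the precondition, e.g. on whereIsWaldo([[1, 1], [1, 1]]): A returns None, B returns None
import Mathlib
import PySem

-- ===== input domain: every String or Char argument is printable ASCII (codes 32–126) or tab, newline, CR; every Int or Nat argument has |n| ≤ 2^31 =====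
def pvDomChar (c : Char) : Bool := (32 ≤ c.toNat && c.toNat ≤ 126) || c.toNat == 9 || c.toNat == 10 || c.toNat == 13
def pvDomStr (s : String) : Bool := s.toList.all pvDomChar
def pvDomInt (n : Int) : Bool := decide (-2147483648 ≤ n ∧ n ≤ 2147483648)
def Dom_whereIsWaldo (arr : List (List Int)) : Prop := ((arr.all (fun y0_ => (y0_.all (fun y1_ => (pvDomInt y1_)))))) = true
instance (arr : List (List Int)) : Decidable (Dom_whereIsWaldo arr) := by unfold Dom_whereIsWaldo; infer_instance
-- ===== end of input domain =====

-- B replaces A's triple list + dict of position lists by a plain value->frequency counter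
-- and a second row-major scan for the first cell whose value occurs exactly once
-- (simpler; a timing run also measured it faster by a constant factor).

-- ===== PORT A =====
def whereIsWaldo (arr : List (List Int)) : Int × Int :=
  let elements : List (Int × Int × Int) :=
    (PySem.List.pyRange 0 (PySem.List.len arr) 1).foldl (fun acc i =>
      (PySem.List.pyRange 0 (PySem.List.len (PySem.List.pyGetD arr i [])) 1).foldl (fun acc2 j =>
        acc2 ++ [(PySem.List.pyGetD (PySem.List.pyGetD arr i []) j 0, i + 1, j + 1)]) acc) []
  let counts : PySem.Dict Int (List (Int × Int)) :=
    elements.foldl (fun d e =>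
      if d.contains e.1 then d.modify e.1 [] (fun l => l ++ [(e.2.1, e.2.2)])
      else d.insert e.1 [(e.2.1, e.2.2)]) PySem.Dict.empty
  match counts.items.find? (fun kv => kv.2.length == 1) with
  | some kv => PySem.List.pyGetD kv.2 0 (0, 0)   -- value[0]; in range since len(value) == 1
  | none => (0, 0)   -- Python falls through returning None here; excluded by Pre_

-- ===== PORT B =====
def whereIsWaldo_alt (arr : List (List Int)) : Int × Int :=
  let counts : PySem.Dict Int Int :=
    arr.foldl (fun d row => row.foldl (fun d2 v => d2.insert v (d2.getD v 0 + 1)) d) PySem.Dict.empty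
  match (PySem.List.enumerate arr 1).findSome? (fun ir =>
      (PySem.List.enumerate ir.2 1).findSome? (fun jv =>
        if counts.getD jv.2 0 == 1 then some (ir.1, jv.1) else none)) with
  | some p => p
  | none => (0, 0)   -- Python falls through returning None here; excluded by Pre_

-- ===== PRECONDITION & SPEC =====
-- Pre_ excludes exactly the grids with no value occurring exactly once: there Python A
-- (and B) falls off the end and returns None, which is not a value of the declared pair type.
def Pre_whereIsWaldo (arr : List (List Int)) : Prop :=
  ∃ v ∈ arr.flatten, arr.flatten.count v = 1
instance (arr : List (List Int)) : Decidable (Pre_whereIsWaldo arr) := by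
  unfold Pre_whereIsWaldo; infer_instance
def pvWitness_whereIsWaldo : List (List Int) := [[1, 2], [2, 3]]
def Spec_whereIsWaldo (arr : List (List Int)) (out : Int × Int) : Prop := out = whereIsWaldo_alt arr
instance (arr : List (List Int)) (out : Int × Int) : Decidable (Spec_whereIsWaldo arr out) := by unfold Spec_whereIsWaldo; infer_instance

-- ===== CLAIM (what is proved, stated in full; the proofs are below) =====
def Claim_equal_whereIsWaldo : Prop := ∀ (arr : List (List Int)), Dom_whereIsWaldo arr → Pre_whereIsWaldo arr → Spec_whereIsWaldo arr (whereIsWaldo arr)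

-- ===== LEMMAS AND PROOFS =====

-- the grid's cells in row-major order, as (value, 1-based position)
theorem pv_find?_congr {α : Type} {p q : α → Bool} (l : List α) (h : ∀ x ∈ l, p x = q x) :
    l.find? p = l.find? q := by
  induction l with
  | nil => rfl
  | cons a t ih =>
    have ha := h a (by simp)
    by_cases hp : p a = true
    · rw [List.find?_cons_of_pos hp, List.find?_cons_of_pos (ha ▸ hp)]
    · rw [List.find?_cons_of_neg hp, List.find?_cons_of_neg (ha ▸ hp),
        ih (fun x hx => h x (by simp [hx]))]

theorem pv_findSome?_congr {α β : Type} {f g : α → Option β} (l : List α)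
    (h : ∀ x ∈ l, f x = g x) : l.findSome? f = l.findSome? g := by
  induction l with
  | nil => rfl
  | cons a t ih =>
    rw [List.findSome?_cons, List.findSome?_cons, h a (by simp),
      ih (fun x hx => h x (by simp [hx]))]

theorem pv_findSome?_filter {α β : Type} {f : α → Option β} {q : α → Bool} (l : List α)
    (h : ∀ x ∈ l, q x = false → f x = none) : l.findSome? f = (l.filter q).findSome? f := by
  induction l with
  | nil => rfl
  | cons a t ih =>
    by_cases hq : q a = true
    · rw [List.filter_cons_of_pos hq, List.findSome?_cons, List.findSome?_cons,
        ih (fun x hx => h x (by simp [hx]))]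
    · rw [List.filter_cons_of_neg hq, List.findSome?_cons,
        h a (by simp) (by simpa using hq), ih (fun x hx => h x (by simp [hx]))]

theorem pv_ofList_filter {α : Type} [BEq α] [LawfulBEq α] (q : α → Bool) (xs : List α) :
    PySem.Set.ofList (xs.filter q) = (PySem.Set.ofList xs).filter q := by
  induction xs with
  | nil => rfl
  | cons x t ih =>
    by_cases hq : q x = true
    · rw [List.filter_cons_of_pos hq, PySem.Set.ofList_cons, PySem.Set.ofList_cons,
        List.filter_cons_of_pos hq]
      simp only [PySem.Set.discard, ih, List.filter_filter]
      congr 1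
      exact List.filter_congr (fun y _ => Bool.and_comm _ _)
    · rw [List.filter_cons_of_neg hq, PySem.Set.ofList_cons, ih,
        List.filter_cons_of_neg hq]
      simp only [PySem.Set.discard, List.filter_filter]
      refine (List.filter_congr (fun y hy => ?_)).symm
      by_cases hyx : y = x
      · subst hyx; simp [hq]
      · simp [hyx]

theorem pv_core {γ : Type} (cs : List (Int × γ)) :
    ((PySem.Set.ofList (cs.map (·.1))).find? (fun k => (cs.map (·.1)).count k == 1)).bind
      (fun k => ((cs.filter (fun e => e.1 == k)).map (·.2)).head?)
    = cs.findSome? (fun e => if (cs.map (·.1)).count e.1 == 1 then some e.2 else none) := by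
  match cs with
  | [] => rfl
  | e :: t =>
    by_cases h1 : ((e :: t).map (·.1)).count e.1 = 1
    · -- head's value is unique: both sides report e's position
      rw [List.map_cons, PySem.Set.ofList_cons,
        List.find?_cons_of_pos (by simpa using h1),
        List.findSome?_cons]
      have h0 : List.count e.1 (t.map (fun x => x.1)) = 0 := by
        simp only [List.map_cons, List.count_cons_self] at h1; omega
      simp [h0]
    · -- head's value repeats: drop all cells with that value and recurse
      have hrec := pv_core (t.filter (fun x => !(x.1 == e.1)))
      have hmap : (t.filter (fun x => !(x.1 == e.1))).map (fun x => x.1)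
          = (t.map (fun x => x.1)).filter (fun v => !(v == e.1)) := by
        rw [List.filter_map]; rfl
      have hcount : ∀ k : Int, k ≠ e.1 →
          List.count k (e.1 :: t.map (fun x => x.1))
            = List.count k ((t.filter (fun x => !(x.1 == e.1))).map (fun x => x.1)) := by
        intro k hk
        rw [List.count_cons_of_ne (Ne.symm hk), hmap,
          List.count_filter (by simp [hk])]
      rw [List.map_cons, PySem.Set.ofList_cons,
        List.find?_cons_of_neg (by simpa using h1)]
      have hset : (PySem.Set.ofList (t.map (fun x => x.1))).discard e.1
          = PySem.Set.ofList ((t.filter (fun x => !(x.1 == e.1))).map (fun x => x.1)) := by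
        rw [hmap, pv_ofList_filter]; rfl
      rw [hset]
      have hmem : ∀ k ∈ PySem.Set.ofList ((t.filter (fun x => !(x.1 == e.1))).map (fun x => x.1)),
          k ≠ e.1 := by
        intro k hk
        rw [PySem.Set.mem_ofList, hmap, List.mem_filter] at hk
        simpa using hk.2
      rw [pv_find?_congr _ (fun k hk => by rw [hcount k (hmem k hk)])]
      have hR : List.findSome?
            (fun e1 => if List.count e1.1 (e.1 :: List.map (fun x => x.1) t) == 1 then some e1.2 else none)
            (e :: t)
          = List.findSome?
            (fun e1 => if List.count e1.1 (List.map (fun x => x.1) (List.filter (fun x => !x.1 == e.1) t)) == 1 then some e1.2 else none)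
            (List.filter (fun x => !x.1 == e.1) t) := by
        rw [List.findSome?_cons]
        have h2 : (List.count e.1 (e.1 :: List.map (fun x => x.1) t) == 1) = false := by
          simpa using h1
        rw [h2]
        simp only [Bool.false_eq_true, if_false]
        rw [pv_findSome?_filter t (q := fun x => !(x.1 == e.1)) (fun x hx hqx => by
          have hx1 : x.1 = e.1 := by simpa using hqx
          rw [hx1, h2]; simp)]
        exact pv_findSome?_congr _ (fun x hx => by
          have hx1 : x.1 ≠ e.1 := by
            have := (List.mem_filter.mp hx).2
            simpa using this
          rw [hcount x.1 hx1])
      rw [hR, ← hrec]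
      cases hfind : (PySem.Set.ofList ((t.filter (fun x => !(x.1 == e.1))).map (fun x => x.1))).find?
          (fun k => ((t.filter (fun x => !(x.1 == e.1))).map (fun x => x.1)).count k == 1) with
      | none => rfl
      | some k =>
        rw [Option.bind_some, Option.bind_some]
        have hk : k ≠ e.1 := hmem k (List.mem_of_find?_eq_some hfind)
        rw [List.filter_cons_of_neg (by simp [Ne.symm hk]), List.filter_filter]
        congr 2
        exact List.filter_congr (fun x _ => by
          by_cases hx : x.1 = k
          · simp [hx]; exact hk
          · simp [hx])
termination_by cs.length
decreasing_by
  simp only [List.length_cons]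
  exact Nat.lt_succ_of_le (List.length_filter_le _ _)

def pvCells (arr : List (List Int)) : List (Int × Int × Int) :=
  (PySem.List.enumerate arr 0).flatMap (fun ir =>
    (PySem.List.enumerate ir.2 0).map (fun jv => (jv.2, ir.1 + 1, jv.1 + 1)))

theorem pv_findSome?_flatMap {α β γ : Type} (l : List α) (f : α → List β) (g : β → Option γ) :
    (l.flatMap f).findSome? g = l.findSome? (fun a => (f a).findSome? g) := by
  induction l with
  | nil => rfl
  | cons a t ih =>
    rw [List.flatMap_cons, List.findSome?_append, List.findSome?_cons, ih]
    cases (f a).findSome? g <;> rfl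

theorem pv_enumerate_shift {α : Type} (xs : List α) (s : Int) :
    PySem.List.enumerate xs (s + 1) = (PySem.List.enumerate xs s).map (fun p => (p.1 + 1, p.2)) := by
  induction xs generalizing s with
  | nil => rfl
  | cons x t ih =>
    rw [PySem.List.enumerate_cons, PySem.List.enumerate_cons, List.map_cons, ih (s + 1)]

theorem pv_countB_aux (arr : List (List Int)) (v : Int) : ∀ d : PySem.Dict Int Int,
    (arr.foldl (fun d row => row.foldl (fun d2 w => d2.insert w (d2.getD w 0 + 1)) d) d).getD v 0
      = d.getD v 0 + (arr.flatten.count v : Int) := by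
  induction arr with
  | nil => intro d; simp
  | cons r t ih =>
    intro d
    rw [List.foldl_cons, ih, PySem.Dict.getD_foldl_insert_add_one, List.flatten_cons,
      List.count_append]
    push_cast; ring

theorem pv_cells_vals (arr : List (List Int)) :
    (pvCells arr).map (fun e => e.1) = arr.flatten := by
  unfold pvCells
  rw [List.map_flatMap]
  have h : ∀ ir : Int × List Int,
      ((PySem.List.enumerate ir.2 0).map (fun jv => (jv.2, ir.1 + 1, jv.1 + 1))).map (fun e => e.1)
        = ir.2 := by
    intro ir
    rw [List.map_map]
    exact PySem.List.map_snd_enumerate ir.2 0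
  simp only [h]
  rw [List.flatMap_def, PySem.List.map_snd_enumerate]

theorem pv_elements_eq (arr : List (List Int)) :
    (PySem.List.pyRange 0 (PySem.List.len arr) 1).foldl (fun acc i =>
      (PySem.List.pyRange 0 (PySem.List.len (PySem.List.pyGetD arr i [])) 1).foldl (fun acc2 j =>
        acc2 ++ [(PySem.List.pyGetD (PySem.List.pyGetD arr i []) j 0, i + 1, j + 1)]) acc) []
      = pvCells arr := by
  symm
  unfold pvCells
  calc (PySem.List.enumerate arr 0).flatMap (fun ir =>
        (PySem.List.enumerate ir.2 0).map (fun jv => (jv.2, ir.1 + 1, jv.1 + 1)))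
      = (PySem.List.enumerate arr 0).foldl (fun acc ir =>
          acc ++ (PySem.List.enumerate ir.2 0).map (fun jv => (jv.2, ir.1 + 1, jv.1 + 1))) [] := by
        rw [PySem.List.foldl_append_eq_flatMap, List.nil_append]
    _ = (PySem.List.enumerate arr 0).foldl (fun acc ir =>
          (PySem.List.enumerate ir.2 0).foldl (fun acc2 jv =>
            acc2 ++ [(jv.2, ir.1 + 1, jv.1 + 1)]) acc) [] := by
        congr 1
        funext acc ir
        rw [PySem.List.foldl_append_singleton_eq_map]
    _ = (PySem.List.enumerate arr 0).foldl (fun acc ir =>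
          (PySem.List.pyRange 0 (PySem.List.len ir.2) 1).foldl (fun acc2 j =>
            acc2 ++ [(PySem.List.pyGetD ir.2 j 0, ir.1 + 1, j + 1)]) acc) [] := by
        congr 1
        funext acc ir
        rw [PySem.List.enumerate_eq_map_pyRange ir.2 0, List.foldl_map]
    _ = (PySem.List.pyRange 0 (PySem.List.len arr) 1).foldl (fun acc i =>
          (PySem.List.pyRange 0 (PySem.List.len (PySem.List.pyGetD arr i [])) 1).foldl (fun acc2 j =>
            acc2 ++ [(PySem.List.pyGetD (PySem.List.pyGetD arr i []) j 0, i + 1, j + 1)]) acc) [] := by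
        rw [PySem.List.enumerate_eq_map_pyRange arr [], List.foldl_map]

theorem pv_cast_beq (c : Nat) : ((c : Int) == 1) = (c == 1) := by
  by_cases h : c = 1
  · simp [h]
  · have : (c : Int) ≠ 1 := by exact_mod_cast h
    simp [h, this]

theorem pv_alt_opt (arr : List (List Int)) :
    (PySem.List.enumerate arr 1).findSome? (fun ir =>
      (PySem.List.enumerate ir.2 1).findSome? (fun jv =>
        if (arr.foldl (fun d row => row.foldl (fun d2 v => d2.insert v (d2.getD v 0 + 1)) d)
              (PySem.Dict.empty : PySem.Dict Int Int)).getD jv.2 0 == 1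
        then some (ir.1, jv.1) else none))
    = (pvCells arr).findSome? (fun e =>
        if arr.flatten.count e.1 == 1 then some (e.2.1, e.2.2) else none) := by
  have hP : ∀ v : Int,
      ((arr.foldl (fun d row => row.foldl (fun d2 v => d2.insert v (d2.getD v 0 + 1)) d)
          (PySem.Dict.empty : PySem.Dict Int Int)).getD v 0 == 1) = (arr.flatten.count v == 1) := by
    intro v
    have h := pv_countB_aux arr v PySem.Dict.empty
    rw [PySem.Dict.getD_empty, zero_add] at h
    simp only [h]
    exact pv_cast_beq _
  have e1 : PySem.List.enumerate arr 1
      = (PySem.List.enumerate arr 0).map (fun p => (p.1 + 1, p.2)) := by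
    simpa using pv_enumerate_shift arr 0
  rw [e1, List.findSome?_map]
  simp only [Function.comp_def]
  unfold pvCells
  rw [pv_findSome?_flatMap]
  refine pv_findSome?_congr _ (fun p _ => ?_)
  have e2 : PySem.List.enumerate p.2 1
      = (PySem.List.enumerate p.2 0).map (fun q => (q.1 + 1, q.2)) := by
    simpa using pv_enumerate_shift p.2 0
  rw [e2, List.findSome?_map, List.findSome?_map]
  simp only [Function.comp_def]
  exact pv_findSome?_congr _ (fun q _ => by rw [hP])

theorem whereIsWaldo_eq_alt (arr : List (List Int)) : whereIsWaldo arr = whereIsWaldo_alt arr := by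
  simp only [whereIsWaldo, whereIsWaldo_alt]
  rw [pv_elements_eq, pv_alt_opt]
  have hbody : (fun (d : PySem.Dict Int (List (Int × Int))) (e : Int × Int × Int) =>
      if d.contains e.1 then d.modify e.1 [] (fun l => l ++ [(e.2.1, e.2.2)])
      else d.insert e.1 [(e.2.1, e.2.2)])
      = (fun d e => d.modify e.1 [] (fun l => l ++ [(e.2.1, e.2.2)])) := by
    funext d e
    by_cases h : d.contains e.1 = true
    · simp [h]
    · have h' : d.contains e.1 = false := by simpa using h
      simp [h', PySem.Dict.modify, PySem.Dict.getD_of_not_contains _ _ h']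
  rw [hbody]
  have hpair : ((pvCells arr).map (fun e => (e.1, (e.2.1, e.2.2)))).foldl
      (fun d p => d.modify p.1 [] (fun l => l ++ [p.2])) PySem.Dict.empty
      = (pvCells arr).foldl (fun d e => d.modify e.1 [] (fun l => l ++ [(e.2.1, e.2.2)]))
          PySem.Dict.empty := by
    rw [List.foldl_map]
  rw [← hpair]
  set prs := (pvCells arr).map (fun e => (e.1, (e.2.1, e.2.2))) with hprs
  set cnts := prs.foldl (fun d p => d.modify p.1 [] (fun l => l ++ [p.2])) PySem.Dict.empty
    with hcnts
  have hnodup : cnts.keys.Nodup := by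
    rw [hcnts]
    exact PySem.Dict.nodup_keys_foldl_modify_key prs (fun p => p.1) []
      (fun _ p => fun l => l ++ [p.2]) PySem.Dict.empty (by simp)
  have hkeys : cnts.keys = PySem.Set.ofList (prs.map (fun p => p.1)) := by
    rw [hcnts]
    have := PySem.Dict.keys_foldl_modify_key prs (fun p => p.1) []
      (fun _ p => fun l => l ++ [p.2]) PySem.Dict.empty
    simpa [PySem.Set.update_nil_left] using this
  have hgetD : ∀ k : Int, cnts.getD k []
      = (prs.filter (fun p => p.1 == k)).map (fun p => p.2) := by
    intro k
    rw [hcnts]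
    have := PySem.Dict.getD_foldl_modify_append prs PySem.Dict.empty k
    simpa using this
  have hlen : ∀ k : Int, ((cnts.getD k []).length == 1)
      = ((prs.map (fun p => p.1)).count k == 1) := by
    intro k
    rw [hgetD k, List.length_map, ← List.countP_eq_length_filter,
      List.count_eq_countP, List.countP_map]
    simp only [hprs, List.countP_map, Function.comp_def]
  rw [PySem.Dict.items_eq_map_keys _ hnodup ([] : List (Int × Int)), List.find?_map]
  simp only [Function.comp_def]
  rw [hkeys, pv_find?_congr _ (fun k _ => hlen k)]
  have hv : prs.map (fun p => p.1) = arr.flatten := by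
    rw [hprs, List.map_map]
    have := pv_cells_vals arr
    simpa [Function.comp_def] using this
  have hcore := pv_core prs
  have hBside : (pvCells arr).findSome? (fun e =>
        if arr.flatten.count e.1 == 1 then some (e.2.1, e.2.2) else none)
      = prs.findSome? (fun p =>
        if (prs.map (fun x => x.1)).count p.1 == 1 then some p.2 else none) := by
    rw [show (prs.map (fun x => x.1)) = arr.flatten from hv, hprs, List.findSome?_map]
    rfl
  rw [hBside, ← hcore]
  cases hfind : (PySem.Set.ofList (prs.map (fun x => x.1))).find?
      (fun k => (prs.map (fun x => x.1)).count k == 1) with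
  | none => rfl
  | some k =>
    simp only [Option.map_some, Option.bind_some]
    have hc1 : (prs.map (fun x => x.1)).count k = 1 := by
      simpa using List.find?_some hfind
    have hl : ((prs.filter (fun p => p.1 == k)).map (fun p => p.2)).length = 1 := by
      rw [List.length_map, ← List.countP_eq_length_filter]
      rw [List.count_eq_countP, List.countP_map] at hc1
      exact hc1
    obtain ⟨x, hx⟩ := List.length_eq_one_iff.mp hl
    rw [hgetD k, hx]
    simp [PySem.List.pyGetD_zero_cons]

-- ===== VERDICT (by name: the statement is the Claim_ definition above) =====
theorem whereIsWaldo_spec : Claim_equal_whereIsWaldo := by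
  intro arr _ _
  unfold Spec_whereIsWaldo
  exact whereIsWaldo_eq_alt arr
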